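-- pv_equiv track=rewrite | github.com/matcom-school/mo_dsl_simplex | framework/simplex_framework/explicit_form.py | iscannon_Matrix
-- ===== SOURCE A (Python) =====
-- def iscannon_Matrix(Matrix):
--     uno =False
--     sect = []
--     for fila in Matrix:
--         uno=False
--         for i in range(len(fila)):
--             if(fila[i]==1 and not uno):
--                 sect.append(i)
--                 uno=True
--                 continue
--             if(fila[i]==1 and uno) :
--                 return False
--
--             if (not (fila[i]==0)):
--                 return False
--
--     for i in range(len(Matrix[0])) :
--         if not (i in sect)  :
--             return False
--
--
--     return True
-- ===== SOURCE B (Python) =====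
-- def iscannon_Matrix(Matrix):
--     if not all(all(x in (0, 1) for x in fila) and sum(fila) <= 1 for fila in Matrix):
--         return False
--     return all(any(j < len(fila) and fila[j] == 1 for fila in Matrix)
--                for j in range(len(Matrix[0])))
-- ===== Notes on version B (the rewrite author's own statement) =====
-- stated objective: alternative
-- what changed: Replaces A's stateful uno-flag scan that accumulates one-positions into a sect list (then tests list membership per column) with arithmetic row validation (every entry in {0,1} and row sum <= 1) plus a column-major coverage test that probes each column index directly for a 1 in some row, keeping no index collection at all.
import Mathlib
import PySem

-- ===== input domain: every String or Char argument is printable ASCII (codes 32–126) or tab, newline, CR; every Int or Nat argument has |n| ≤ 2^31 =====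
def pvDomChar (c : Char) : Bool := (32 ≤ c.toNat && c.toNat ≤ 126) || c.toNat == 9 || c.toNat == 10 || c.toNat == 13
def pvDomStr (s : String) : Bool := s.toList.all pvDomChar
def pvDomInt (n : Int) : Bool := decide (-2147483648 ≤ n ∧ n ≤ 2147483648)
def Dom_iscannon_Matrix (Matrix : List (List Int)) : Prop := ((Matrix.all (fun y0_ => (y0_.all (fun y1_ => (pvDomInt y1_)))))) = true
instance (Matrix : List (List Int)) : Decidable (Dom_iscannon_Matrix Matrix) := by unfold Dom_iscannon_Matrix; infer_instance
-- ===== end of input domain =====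

-- B replaces A's stateful uno-flag scan accumulating a sect position list with arithmetic row
-- validation (entries in {0,1}, row sum ≤ 1) and a direct column-major coverage probe (alternative).

-- ===== PORT A =====
-- inner loop 'for i in range(len(fila))' with state (uno, sect); none = early 'return False'
def pvRowA : List Int → Int → Bool → List Int → Option (List Int)
  | [], _, _, sect => some sect
  | x :: rest, i, uno, sect =>
    if x == 1 && !uno then pvRowA rest (i + 1) true (sect ++ [i])
    else if x == 1 && uno then none
    else if !(x == 0) then none
    else pvRowA rest (i + 1) uno sect

-- outer loop 'for fila in Matrix' threading sect
def pvRowsA : List (List Int) → List Int → Option (List Int)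
  | [], sect => some sect
  | fila :: rest, sect =>
    match pvRowA fila 0 false sect with
    | none => none
    | some s => pvRowsA rest s

def iscannon_Matrix (Matrix : List (List Int)) : Bool :=
  match pvRowsA Matrix [] with
  | none => false
  | some sect =>
    -- Python raises IndexError at Matrix[0] when Matrix = []; Pre_ excludes that input (headD is a totality default)
    (PySem.List.pyRange 0 ((Matrix.headD []).length : Int) 1).all (fun i => sect.contains i)

-- ===== PORT B =====
-- 'all(x in (0, 1) for x in fila) and sum(fila) <= 1'
def pvRowOkB (fila : List Int) : Bool :=
  fila.all (fun x => x == 0 || x == 1) && decide (fila.sum ≤ 1)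

def iscannon_Matrix_alt (Matrix : List (List Int)) : Bool :=
  if !(Matrix.all pvRowOkB) then false
  else
    -- Python raises IndexError at Matrix[0] when Matrix = []; Pre_ excludes that input (headD is a totality default)
    (PySem.List.pyRange 0 ((Matrix.headD []).length : Int) 1).all (fun j =>
      Matrix.any (fun fila =>
        decide (j < (fila.length : Int)) && (PySem.List.pyGet? fila j == some 1)))

-- ===== PRECONDITION & SPEC =====
-- Pre_ excludes only the empty Matrix, on which both Pythons raise IndexError at Matrix[0].
def Pre_iscannon_Matrix (Matrix : List (List Int)) : Prop := Matrix ≠ []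
instance (Matrix : List (List Int)) : Decidable (Pre_iscannon_Matrix Matrix) := by unfold Pre_iscannon_Matrix; infer_instance
def pvWitness_iscannon_Matrix : List (List Int) := [[1, 0], [0, 1]]
def Spec_iscannon_Matrix (Matrix : List (List Int)) (out : Bool) : Prop := out = iscannon_Matrix_alt Matrix
instance (Matrix : List (List Int)) (out : Bool) : Decidable (Spec_iscannon_Matrix Matrix out) := by unfold Spec_iscannon_Matrix; infer_instance

-- ===== CLAIM (what is proved, stated in full; the proofs are below) =====
def Claim_equal_iscannon_Matrix : Prop := ∀ (Matrix : List (List Int)), Dom_iscannon_Matrix Matrix → Pre_iscannon_Matrix Matrix → Spec_iscannon_Matrix Matrix (iscannon_Matrix Matrix)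

-- ===== LEMMAS AND PROOFS =====

-- proof helper: the positions (starting at s) of the entries equal to 1
def pvOnes : List Int → Int → List Int
  | [], _ => []
  | x :: rest, s => if x == 1 then s :: pvOnes rest (s + 1) else pvOnes rest (s + 1)

-- proof helper: A rejects row fila iff this holds
def pvRowFailA (fila : List Int) : Bool :=
  decide (1 < (pvOnes fila 0).length) || fila.any (fun x => !(x == 0) && !(x == 1))

theorem pvOnes_nil_iff (xs : List Int) (s : Int) :
    pvOnes xs s = [] ↔ xs.any (fun x => x == 1) = false := by
  induction xs generalizing s with
  | nil => simp [pvOnes]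
  | cons x rest ih =>
    by_cases h : x = 1 <;> simp [pvOnes, h, ih]

-- after the flag is set: return False iff some entry is 1 or some entry is neither 0 nor 1
theorem pvRowA_true (xs : List Int) (s : Int) (sect : List Int) :
    pvRowA xs s true sect =
      if xs.any (fun x => x == 1) || xs.any (fun x => !(x == 0) && !(x == 1)) then none
      else some sect := by
  induction xs generalizing s with
  | nil => simp [pvRowA]
  | cons x rest ih =>
    by_cases h1 : x = 1
    · simp [pvRowA, h1]
    · by_cases h0 : x = 0
      · simp [pvRowA, h0, ih]
      · simp [pvRowA, h1, h0]

-- full characterisation of A's inner loop from the fresh state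
theorem pvRowA_char (xs : List Int) (s : Int) (sect : List Int) :
    pvRowA xs s false sect =
      if (pvOnes xs s).length > 1 || xs.any (fun x => !(x == 0) && !(x == 1)) then none
      else some (sect ++ pvOnes xs s) := by
  induction xs generalizing s sect with
  | nil => simp [pvRowA, pvOnes]
  | cons x rest ih =>
    by_cases h1 : x = 1
    · rw [show pvRowA (x :: rest) s false sect = pvRowA rest (s + 1) true (sect ++ [s]) by
        simp [pvRowA, h1]]
      rw [pvRowA_true]
      by_cases hr : rest.any (fun x => x == 1) = true
      · have hne : pvOnes rest (s + 1) ≠ [] := by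
          intro h; rw [pvOnes_nil_iff] at h; simp [h] at hr
        have hpos : 0 < (pvOnes rest (s + 1)).length := List.length_pos_iff.mpr hne
        simp only [h1, hr, pvOnes, beq_self_eq_true, if_true]
        rw [if_pos (by simp), if_pos (by simp; omega)]
      · have he : pvOnes rest (s + 1) = [] :=
          (pvOnes_nil_iff rest (s + 1)).mpr (Bool.eq_false_iff.mpr hr)
        simp [h1, hr, pvOnes, he]
    · by_cases h0 : x = 0
      · rw [show pvRowA (x :: rest) s false sect = pvRowA rest (s + 1) false sect by
          simp [pvRowA, h0]]
        rw [ih]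
        simp [pvOnes, h0]
      · simp [pvRowA, pvOnes, h0, h1]

-- characterisation of A's outer loop
theorem pvRowsA_char (M : List (List Int)) (sect : List Int) :
    pvRowsA M sect =
      if M.any pvRowFailA then none
      else some (sect ++ M.flatMap (fun f => pvOnes f 0)) := by
  induction M generalizing sect with
  | nil => simp [pvRowsA]
  | cons fila rest ih =>
    rw [show pvRowsA (fila :: rest) sect =
        (match pvRowA fila 0 false sect with
         | none => none
         | some s => pvRowsA rest s) from rfl]
    rw [pvRowA_char]
    by_cases hf : pvRowFailA fila = true
    · have : ((pvOnes fila 0).length > 1 || fila.any (fun x => !(x == 0) && !(x == 1))) = true := by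
        unfold pvRowFailA at hf
        simpa using hf
      simp [this, List.any_cons, hf]
    · have : ((pvOnes fila 0).length > 1 || fila.any (fun x => !(x == 0) && !(x == 1))) = false := by
        unfold pvRowFailA at hf
        simpa using Bool.eq_false_iff.mpr hf
      simp only [this, Bool.false_eq_true, if_false, ih, List.any_cons,
        Bool.eq_false_iff.mpr hf, Bool.false_or, List.flatMap_cons, List.append_assoc]

-- under the all-entries-in-{0,1} hypothesis the row sum counts the ones
theorem sum_eq_ones (xs : List Int) (s : Int)
    (h : ∀ x ∈ xs, x = 0 ∨ x = 1) :
    xs.sum = ((pvOnes xs s).length : Int) := by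
  induction xs generalizing s with
  | nil => simp [pvOnes]
  | cons x rest ih =>
    have hx := h x (by simp)
    have hr : ∀ y ∈ rest, y = 0 ∨ y = 1 := fun y hy => h y (by simp [hy])
    rcases hx with rfl | rfl
    · simp [pvOnes, ih (s+1) hr]
    · simp [pvOnes, ih (s+1) hr]; ring

-- the two row tests agree
theorem rowFail_eq (f : List Int) : pvRowFailA f = !pvRowOkB f := by
  unfold pvRowFailA pvRowOkB
  by_cases hb : f.all (fun x => x == 0 || x == 1) = true
  · have hmem : ∀ x ∈ f, x = 0 ∨ x = 1 := by
      intro x hx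
      have := List.all_eq_true.mp hb x hx
      simpa using this
    have hany : f.any (fun x => !(x == 0) && !(x == 1)) = false := by
      rw [List.any_eq_false]
      intro x hx
      rcases hmem x hx with rfl | rfl <;> simp
    have hsum := sum_eq_ones f 0 hmem
    rw [hany, hb, hsum]
    rw [Bool.eq_iff_iff]
    simp only [Bool.or_false, Bool.true_and, Bool.not_eq_true', decide_eq_true_eq,
      decide_eq_false_iff_not, not_le]
    omega
  · have hb' : f.all (fun x => x == 0 || x == 1) = false := Bool.eq_false_iff.mpr hb
    have hany : f.any (fun x => !(x == 0) && !(x == 1)) = true := by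
      rw [List.any_eq_true]
      obtain ⟨x, hx, hpx⟩ := List.all_eq_false.mp hb'
      refine ⟨x, hx, ?_⟩
      simp only [Bool.or_eq_true, beq_iff_eq, not_or] at hpx
      simp [hpx.1, hpx.2]
    rw [hb', hany]
    simp

theorem anyFail_eq (M : List (List Int)) : M.any pvRowFailA = !M.all pvRowOkB := by
  induction M with
  | nil => simp
  | cons f rest ih => simp [rowFail_eq, ih]

-- membership in the one-position list
theorem mem_pvOnes (xs : List Int) (s j : Int) :
    j ∈ pvOnes xs s ↔ ∃ k : Nat, xs[k]? = some 1 ∧ j = s + k := by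
  induction xs generalizing s with
  | nil => simp [pvOnes]
  | cons x rest ih =>
    by_cases h : x = 1
    · simp only [pvOnes, h, beq_self_eq_true, if_true, List.mem_cons, ih]
      constructor
      · rintro (rfl | ⟨k, hk, rfl⟩)
        · exact ⟨0, by simp, by simp⟩
        · exact ⟨k + 1, by simpa using hk, by push_cast; ring⟩
      · rintro ⟨k, hk, rfl⟩
        cases k with
        | zero => left; simp
        | succ k =>
          right
          exact ⟨k, by simpa using hk, by push_cast; ring⟩
    · rw [show pvOnes (x :: rest) s = pvOnes rest (s + 1) by simp [pvOnes, h]]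
      rw [ih]
      constructor
      · rintro ⟨k, hk, rfl⟩
        exact ⟨k + 1, by simpa using hk, by push_cast; ring⟩
      · rintro ⟨k, hk, rfl⟩
        cases k with
        | zero => simp at hk; exact absurd hk h
        | succ k =>
          exact ⟨k, by simpa using hk, by push_cast; ring⟩

theorem mem_pvOnes_zero (f : List Int) (j : Int) (hj : 0 ≤ j) :
    j ∈ pvOnes f 0 ↔ (j < (f.length : Int) ∧ PySem.List.pyGet? f j = some 1) := by
  rw [mem_pvOnes]
  constructor
  · rintro ⟨k, hk, rfl⟩
    have hlt : k < f.length := by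
      rcases List.getElem?_eq_some_iff.mp hk with ⟨h', _⟩
      exact h'
    refine ⟨by simpa using hlt, ?_⟩
    rw [show ((0 : Int) + k) = (k : Int) by ring, PySem.List.pyGet?_natCast]
    exact hk
  · rintro ⟨hlt, hget⟩
    refine ⟨j.toNat, ?_, by omega⟩
    rw [PySem.List.pyGet?_of_nonneg _ hj] at hget
    exact hget

-- the two coverage tests agree on nonnegative column indices
theorem coverage_eq (M : List (List Int)) (j : Int) (hj : 0 ≤ j) :
    (M.flatMap (fun f => pvOnes f 0)).contains j =
      M.any (fun fila =>
        decide (j < (fila.length : Int)) && (PySem.List.pyGet? fila j == some 1)) := by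
  rw [Bool.eq_iff_iff]
  simp only [List.contains_iff_mem, List.mem_flatMap, List.any_eq_true,
    Bool.and_eq_true, decide_eq_true_eq, beq_iff_eq]
  constructor
  · rintro ⟨f, hf, hm⟩
    exact ⟨f, hf, (mem_pvOnes_zero f j hj).mp hm⟩
  · rintro ⟨f, hf, h1, h2⟩
    exact ⟨f, hf, (mem_pvOnes_zero f j hj).mpr ⟨h1, h2⟩⟩

-- ===== VERDICT (by name: the statement is the Claim_ definition above) =====
theorem iscannon_Matrix_spec : Claim_equal_iscannon_Matrix := by
  intro Matrix _ _
  unfold Spec_iscannon_Matrix iscannon_Matrix iscannon_Matrix_alt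
  rw [pvRowsA_char, anyFail_eq]
  cases hall : Matrix.all pvRowOkB with
  | false => simp
  | true =>
    simp only [Bool.not_true, Bool.false_eq_true, if_false]
    rw [Bool.eq_iff_iff, List.all_eq_true, List.all_eq_true]
    constructor <;> intro h j hjmem <;>
      have hj0 : 0 ≤ j := (PySem.List.mem_pyRange_one.mp hjmem).1
    · rw [← coverage_eq Matrix j hj0]
      simpa using h j hjmem
    · rw [show ([] : List Int) ++ Matrix.flatMap (fun f => pvOnes f 0)
          = Matrix.flatMap (fun f => pvOnes f 0) from rfl]
      rw [coverage_eq Matrix j hj0]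
      exact h j hjmem
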